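-- pv_equiv track=rewrite | github.com/smthorat/NLP | Gene non_gene classification.py | filter_for_gene_regions
-- ===== SOURCE A (Python) =====
-- def filter_for_gene_regions(sequence, gene_coordinates):
--     labeled_sequence = []
--     for i in range(len(sequence)):  # Iterate through each base in the sequence.
--         label = 'Non-Gene'  # Default label for each base.
--         for start, end in gene_coordinates:  # Check each base against the provided gene coordinates.
--             if start <= i < end:  # If the base index falls within a gene region, label it as 'Gene'.
--                 label = 'Gene'
--                 break
--         labeled_sequence.append((sequence[i], label))  # Append the base and its label to the list.
--     return labeled_sequence
-- ===== SOURCE B (Python) =====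
-- def filter_for_gene_regions(sequence, gene_coordinates):
--     # Difference-array sweep: O(len(sequence) + len(gene_coordinates)) instead of A's per-base scan of all intervals.
--     n = len(sequence)
--     diff = [0] * (n + 1)
--     for start, end in gene_coordinates:
--         lo = max(start, 0)
--         hi = min(end, n)
--         if lo < hi:
--             diff[lo] += 1
--             diff[hi] -= 1
--     out = []
--     running = 0
--     for i, ch in enumerate(sequence):
--         running += diff[i]
--         out.append((ch, 'Gene' if running > 0 else 'Non-Gene'))
--     return out
-- ===== Notes on version B (the rewrite author's own statement) =====
-- stated objective: faster
-- what changed: Replaces the per-base scan over all gene intervals with a difference-array: each (clamped) interval is marked once with +1/-1 and a single prefix-sum sweep labels every base, removing the inner loop.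
import Mathlib
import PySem

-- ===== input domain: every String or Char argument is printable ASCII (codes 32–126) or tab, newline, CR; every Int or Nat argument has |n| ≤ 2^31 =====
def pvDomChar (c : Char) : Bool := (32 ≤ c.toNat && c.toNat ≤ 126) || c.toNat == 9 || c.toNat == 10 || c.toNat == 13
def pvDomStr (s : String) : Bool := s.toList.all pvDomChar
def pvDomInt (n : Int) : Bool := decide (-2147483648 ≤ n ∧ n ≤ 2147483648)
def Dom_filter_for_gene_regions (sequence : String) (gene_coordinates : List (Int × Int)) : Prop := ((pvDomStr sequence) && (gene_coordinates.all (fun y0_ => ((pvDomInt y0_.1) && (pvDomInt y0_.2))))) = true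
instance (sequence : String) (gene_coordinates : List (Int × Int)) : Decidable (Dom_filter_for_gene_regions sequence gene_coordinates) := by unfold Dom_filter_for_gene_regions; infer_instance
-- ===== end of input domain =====

-- B replaces A's per-base scan over all intervals with a difference-array + prefix-sum sweep (objective: faster).

-- ===== PORT A =====
-- inner loop of A: first interval containing i wins ('break'), default 'Non-Gene'
def pvLabelA : List (Int × Int) → Int → String
  | [], _ => "Non-Gene"
  | (s, e) :: rest, i => if s ≤ i ∧ i < e then "Gene" else pvLabelA rest i

def filter_for_gene_regions (sequence : String) (gene_coordinates : List (Int × Int)) : List (String × String) :=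
  (sequence.toList.zipIdx).foldl
    (fun acc ci => acc ++ [(String.ofList [ci.1], pvLabelA gene_coordinates (ci.2 : Int))]) []

-- ===== PORT B =====
-- one diff-array update of Source B: clamp the interval to [0, n), then diff[lo] += 1; diff[hi] -= 1
def pvDiffStep (n : Nat) (d : List Int) (p : Int × Int) : List Int :=
  let lo := max p.1 0
  let hi := min p.2 (n : Int)
  if lo < hi then
    let d1 := d.set lo.toNat (d.getD lo.toNat 0 + 1)
    d1.set hi.toNat (d1.getD hi.toNat 0 - 1)
  else d

def filter_for_gene_regions_alt (sequence : String) (gene_coordinates : List (Int × Int)) : List (String × String) :=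
  let cs := sequence.toList
  let n := cs.length
  let diff := gene_coordinates.foldl (pvDiffStep n) (List.replicate (n + 1) 0)
  (cs.zipIdx.foldl
    (fun (st : List (String × String) × Int) ci =>
      let running := st.2 + diff.getD ci.2 0
      (st.1 ++ [(String.ofList [ci.1], if 0 < running then "Gene" else "Non-Gene")], running))
    ([], 0)).1

-- ===== PRECONDITION & SPEC =====
def Spec_filter_for_gene_regions (sequence : String) (gene_coordinates : List (Int × Int)) (out : List (String × String)) : Prop := out = filter_for_gene_regions_alt sequence gene_coordinates
instance (sequence : String) (gene_coordinates : List (Int × Int)) (out : List (String × String)) : Decidable (Spec_filter_for_gene_regions sequence gene_coordinates out) := by unfold Spec_filter_for_gene_regions; infer_instance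

-- ===== CLAIM (what is proved, stated in full; the proofs are below) =====
def Claim_equal_filter_for_gene_regions : Prop := ∀ (sequence : String) (gene_coordinates : List (Int × Int)), Dom_filter_for_gene_regions sequence gene_coordinates → Spec_filter_for_gene_regions sequence gene_coordinates (filter_for_gene_regions sequence gene_coordinates)

-- ===== LEMMAS AND PROOFS =====

-- prefix sum of the first m cells of the diff array
def pvPrefix (d : List Int) (m : Nat) : Int := ((List.range m).map (fun k => d.getD k 0)).sum

lemma pvPrefix_succ (d : List Int) (t : Nat) : pvPrefix d (t + 1) = pvPrefix d t + d.getD t 0 := by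
  simp [pvPrefix, List.range_succ]

lemma pvGetD_set (d : List Int) (k i : Nat) (v : Int) :
    (d.set k v).getD i 0 = if i = k ∧ k < d.length then v else d.getD i 0 := by
  simp [List.getD_eq_getElem?_getD, List.getElem?_set]
  split_ifs <;> simp_all

lemma pvPrefix_set (d : List Int) (k m : Nat) (c : Int) (hk : k < d.length) :
    pvPrefix (d.set k (d.getD k 0 + c)) m = pvPrefix d m + (if k < m then c else 0) := by
  induction m with
  | zero => simp [pvPrefix]
  | succ m ih =>
    rw [pvPrefix_succ, pvPrefix_succ, ih, pvGetD_set]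
    by_cases h : m = k <;> split_ifs <;> simp_all <;> omega

lemma pvLength_diffStep (n : Nat) (d : List Int) (p : Int × Int) :
    (pvDiffStep n d p).length = d.length := by
  simp only [pvDiffStep]
  split_ifs <;> simp

lemma pvPrefix_diffStep (n j : Nat) (hj : j < n) (d : List Int) (hd : d.length = n + 1)
    (p : Int × Int) :
    pvPrefix (pvDiffStep n d p) (j + 1) =
      pvPrefix d (j + 1) + (if p.1 ≤ (j : Int) ∧ (j : Int) < p.2 then 1 else 0) := by
  simp only [pvDiffStep]
  by_cases hlt : max p.1 0 < min p.2 (n : Int)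
  · simp only [hlt, if_true]
    have hlo : (max p.1 0).toNat < d.length := by omega
    have hhi : (min p.2 (n : Int)).toNat < (d.set (max p.1 0).toNat ((d.getD (max p.1 0).toNat 0) + 1)).length := by
      simp only [List.length_set]; omega
    have h2 := pvPrefix_set (d.set (max p.1 0).toNat ((d.getD (max p.1 0).toNat 0) + 1))
      ((min p.2 (n : Int)).toNat) (j + 1) (-1) hhi
    have h1 := pvPrefix_set d ((max p.1 0).toNat) (j + 1) 1 hlo
    simp only [sub_eq_add_neg]
    rw [h2, h1]
    split_ifs <;> omega
  · simp only [hlt, if_false]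
    have : ¬ (p.1 ≤ (j : Int) ∧ (j : Int) < p.2) := by omega
    simp [this]

lemma pvPrefix_fold (n j : Nat) (hj : j < n) (gcs : List (Int × Int)) :
    ∀ d : List Int, d.length = n + 1 →
      pvPrefix (gcs.foldl (pvDiffStep n) d) (j + 1) =
        pvPrefix d (j + 1) +
          (gcs.countP (fun p => decide (p.1 ≤ (j : Int) ∧ (j : Int) < p.2)) : Int) := by
  induction gcs with
  | nil => intro d _; simp
  | cons p rest ih =>
    intro d hd
    have hlen : (pvDiffStep n d p).length = n + 1 := by rw [pvLength_diffStep]; exact hd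
    rw [List.foldl_cons, ih _ hlen, pvPrefix_diffStep n j hj d hd p, List.countP_cons]
    by_cases h : p.1 ≤ (j : Int) ∧ (j : Int) < p.2 <;> simp [h] <;> ring

lemma pvPrefix_replicate (n m : Nat) : pvPrefix (List.replicate n (0 : Int)) m = 0 := by
  induction m with
  | zero => simp [pvPrefix]
  | succ m ih =>
    rw [pvPrefix_succ, ih]
    simp [List.getD_eq_getElem?_getD, List.getElem?_replicate]
    split <;> rfl

lemma pvLabelA_eq (gcs : List (Int × Int)) (i : Int) :
    pvLabelA gcs i =
      if 0 < gcs.countP (fun p => decide (p.1 ≤ i ∧ i < p.2)) then "Gene" else "Non-Gene" := by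
  induction gcs with
  | nil => simp [pvLabelA]
  | cons p rest ih =>
    obtain ⟨s, e⟩ := p
    rw [List.countP_cons]
    by_cases h : s ≤ i ∧ i < e
    · simp [pvLabelA, h]
    · have hd : (decide (s ≤ i ∧ i < e)) = false := by simp [h]
      rw [hd]
      simp [pvLabelA, h, ih]

lemma pvLoopB (diff : List Int) :
    ∀ (l : List Char) (t : Nat) (acc : List (String × String)),
      (l.zipIdx t).foldl
        (fun (st : List (String × String) × Int) ci =>
          let running := st.2 + diff.getD ci.2 0
          (st.1 ++ [(String.ofList [ci.1], if 0 < running then "Gene" else "Non-Gene")], running))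
        (acc, pvPrefix diff t)
      = (acc ++ (l.zipIdx t).map
            (fun ci => (String.ofList [ci.1], if 0 < pvPrefix diff (ci.2 + 1) then "Gene" else "Non-Gene")),
          pvPrefix diff (t + l.length)) := by
  intro l
  induction l with
  | nil => intro t acc; simp
  | cons a l ih =>
    intro t acc
    rw [List.zipIdx_cons, List.foldl_cons]
    have hstep : pvPrefix diff t + diff.getD t 0 = pvPrefix diff (t + 1) := (pvPrefix_succ diff t).symm
    simp only [hstep]
    rw [ih (t + 1) (acc ++ [(String.ofList [a], if 0 < pvPrefix diff (t + 1) then "Gene" else "Non-Gene")])]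
    simp only [List.map_cons, List.append_assoc, List.singleton_append, List.length_cons]
    have hnn : t + 1 + l.length = t + (l.length + 1) := by omega
    rw [hnn]

-- ===== VERDICT (by name: the statement is the Claim_ definition above) =====
theorem filter_for_gene_regions_spec : Claim_equal_filter_for_gene_regions := by
  intro sequence gcs _
  unfold Spec_filter_for_gene_regions
  simp only [filter_for_gene_regions, filter_for_gene_regions_alt,
    PySem.List.foldl_append_singleton_eq_map, List.nil_append]
  generalize hd : gcs.foldl (pvDiffStep sequence.toList.length)
      (List.replicate (sequence.toList.length + 1) 0) = diff
  have h0 : pvPrefix diff 0 = 0 := rfl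
  have hB := pvLoopB diff sequence.toList 0 []
  rw [h0] at hB
  rw [hB]
  simp only [List.nil_append]
  apply List.map_congr_left
  intro ci hci
  obtain ⟨c, j⟩ := ci
  have hjn : j < sequence.toList.length := by
    have h1 := List.mem_zipIdx hci
    simp at h1
    have h2 : sequence.toList.length = sequence.length := by simp
    omega
  have hcnt := pvPrefix_fold sequence.toList.length j hjn gcs
    (List.replicate (sequence.toList.length + 1) 0) (by simp)
  rw [pvPrefix_replicate, zero_add, hd] at hcnt
  rw [pvLabelA_eq]
  simp only [hcnt]
  split_ifs with h1 h2 h2 <;> first | rfl | (exfalso; omega)
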